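-- pv_equiv track=rewrite | github.com/tlenz88/Miscellaneous | hic_scripts/diff_arrays.py | get_chrom_starts
-- ===== SOURCE A (Python) =====
-- def get_chrom_starts(chrom_sizes, chr):
-- 	start_index = 0
-- 	end_index = 0
-- 	chrom_starts = {}
-- 	chrom_ends = {}
-- 	for chrom in chr:
-- 		end_index = start_index + chrom_sizes[chrom]
-- 		chrom_starts[chrom] = start_index
-- 		chrom_ends[chrom] = end_index
-- 		start_index = end_index
-- 	return chrom_starts
-- ===== SOURCE B (Python) =====
-- def get_chrom_starts(chrom_sizes, chr):
--     return {c: sum(chrom_sizes[x] for x in chr[:i]) for i, c in enumerate(chr)}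
-- ===== Notes on version B (the rewrite author's own statement) =====
-- stated objective: alternative
-- what changed: B drops A's running start/end accumulator and its unused chrom_ends dict entirely: each chromosome's offset is computed independently as the sum of the sizes of the chromosomes preceding it in chr (a dict comprehension over enumerate with a per-element slice-sum), trading A's O(n) single accumulator pass for an O(n^2) accumulator-free formulation.
import Mathlib
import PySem

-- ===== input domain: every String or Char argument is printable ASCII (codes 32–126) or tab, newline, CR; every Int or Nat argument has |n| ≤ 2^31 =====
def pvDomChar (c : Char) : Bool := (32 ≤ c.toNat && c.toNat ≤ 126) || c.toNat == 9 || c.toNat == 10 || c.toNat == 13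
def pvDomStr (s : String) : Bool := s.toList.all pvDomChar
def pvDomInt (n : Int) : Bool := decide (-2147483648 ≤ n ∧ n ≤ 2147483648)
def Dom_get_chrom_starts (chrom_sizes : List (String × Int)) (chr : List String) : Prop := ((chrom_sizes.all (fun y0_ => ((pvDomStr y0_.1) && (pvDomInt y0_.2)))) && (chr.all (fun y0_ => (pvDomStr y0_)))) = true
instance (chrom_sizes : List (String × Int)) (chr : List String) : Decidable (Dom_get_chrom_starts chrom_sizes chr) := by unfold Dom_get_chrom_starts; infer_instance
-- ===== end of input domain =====

-- B drops A's running accumulator (and the unused chrom_ends dict): each offset is computed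
-- independently as the sum of the sizes of the preceding chromosomes; return value only.

-- ===== PORT A =====
-- state = (start_index, chrom_starts, chrom_ends); chrom_sizes[chrom] is a dict lookup,
-- KeyError (excluded by Pre_) ported as getD 0.
def get_chrom_starts (chrom_sizes : List (String × Int)) (chr : List String) : List (String × Int) :=
  let d := PySem.Dict.ofList chrom_sizes
  (chr.foldl
    (fun (st : Int × PySem.Dict String Int × PySem.Dict String Int) chrom =>
      let end_index := st.1 + d.getD chrom 0
      (end_index, st.2.1.insert chrom st.1, st.2.2.insert chrom end_index))
    (0, PySem.Dict.empty, PySem.Dict.empty)).2.1.items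

-- ===== PORT B =====
-- dict comprehension over enumerate; sum(chrom_sizes[x] for x in chr[:i]) is a slice then a
-- sum-fold; missing keys (KeyError, excluded by Pre_) ported as getD 0.
def get_chrom_starts_alt (chrom_sizes : List (String × Int)) (chr : List String) : List (String × Int) :=
  let d := PySem.Dict.ofList chrom_sizes
  ((PySem.List.enumerate chr 0).foldl
    (fun (dd : PySem.Dict String Int) p =>
      dd.insert p.2 ((PySem.List.slice chr none (some p.1)).foldl (fun s x => s + d.getD x 0) 0))
    PySem.Dict.empty).items

-- ===== PRECONDITION & SPEC =====
-- Pre_ excludes exactly the inputs where A raises KeyError: some name in chr missing from chrom_sizes.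
def Pre_get_chrom_starts (chrom_sizes : List (String × Int)) (chr : List String) : Prop :=
  ∀ c ∈ chr, (PySem.Dict.ofList chrom_sizes).contains c = true
instance (chrom_sizes : List (String × Int)) (chr : List String) : Decidable (Pre_get_chrom_starts chrom_sizes chr) := by unfold Pre_get_chrom_starts; infer_instance

def pvWitness_get_chrom_starts : (List (String × Int)) × List String :=
  ([("chr1", 10), ("chr2", 5)], ["chr1", "chr2"])

def Spec_get_chrom_starts (chrom_sizes : List (String × Int)) (chr : List String) (out : List (String × Int)) : Prop := out = get_chrom_starts_alt chrom_sizes chr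
instance (chrom_sizes : List (String × Int)) (chr : List String) (out : List (String × Int)) : Decidable (Spec_get_chrom_starts chrom_sizes chr out) := by unfold Spec_get_chrom_starts; infer_instance

-- ===== CLAIM (what is proved, stated in full; the proofs are below) =====
def Claim_equal_get_chrom_starts : Prop := ∀ (chrom_sizes : List (String × Int)) (chr : List String), Dom_get_chrom_starts chrom_sizes chr → Pre_get_chrom_starts chrom_sizes chr → Spec_get_chrom_starts chrom_sizes chr (get_chrom_starts chrom_sizes chr)
-- ===== LEMMAS AND PROOFS =====

-- prefix sum of sizes over the first k names of chr
def pvPsum (f : String → Int) (chr : List String) (k : Nat) : Int := ((chr.take k).map f).sum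

theorem pvPsum_succ (f : String → Int) (chr cs : List String) (k : Nat) (c : String)
    (h : chr.drop k = c :: cs) :
    pvPsum f chr (k + 1) = pvPsum f chr k + f c := by
  have hk : chr[k]? = some c := by
    have h0 : (chr.drop k)[0]? = some c := by rw [h]; rfl
    simpa using h0
  simp [pvPsum, List.take_add_one, hk]

-- the two folds agree on the suffix chr.drop k, with A's accumulator at the prefix sum
theorem pvBoth (f : String → Int) (chr : List String) :
    ∀ (l : List String) (k : Nat), chr.drop k = l → ∀ (dst dend : PySem.Dict String Int),
      (l.foldl
        (fun (st : Int × PySem.Dict String Int × PySem.Dict String Int) chrom =>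
          (st.1 + f chrom, st.2.1.insert chrom st.1, st.2.2.insert chrom (st.1 + f chrom)))
        (pvPsum f chr k, dst, dend)).2.1
      = (PySem.List.enumerate l (k : Int)).foldl
          (fun dd p =>
            dd.insert p.2 ((PySem.List.slice chr none (some p.1)).foldl (fun s x => s + f x) 0))
          dst := by
  intro l
  induction l with
  | nil => intro k _ dst dend; simp [PySem.List.enumerate_nil]
  | cons c cs ih =>
    intro k hdrop dst dend
    have hdrop' : chr.drop (k + 1) = cs := by
      have h1 : (chr.drop k).drop 1 = cs := by rw [hdrop]; rfl
      rwa [List.drop_drop] at h1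
    have hsucc : pvPsum f chr (k + 1) = pvPsum f chr k + f c :=
      pvPsum_succ f chr cs k c hdrop
    have hslice : PySem.List.slice chr none (some (k : Int)) = chr.take k :=
      PySem.List.slice_to_natCast chr k
    rw [PySem.List.enumerate_cons]
    simp only [List.foldl_cons]
    rw [hslice, PySem.List.foldl_add, zero_add,
      show ((k : Int) + 1) = ((k + 1 : Nat) : Int) by push_cast; ring,
      show (List.map f (List.take k chr)).sum = pvPsum f chr k from rfl,
      ← ih (k + 1) hdrop' (dst.insert c (pvPsum f chr k)) (dend.insert c (pvPsum f chr k + f c)),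
      hsucc]

-- ===== VERDICT (by name: the statement is the Claim_ definition above) =====
theorem get_chrom_starts_spec : Claim_equal_get_chrom_starts := by
  intro chrom_sizes chr _ _
  unfold Spec_get_chrom_starts get_chrom_starts get_chrom_starts_alt
  have h := pvBoth (fun c => (PySem.Dict.ofList chrom_sizes).getD c 0) chr chr 0 rfl
    PySem.Dict.empty PySem.Dict.empty
  simp only [pvPsum, List.take_zero, List.map_nil, List.sum_nil, Nat.cast_zero] at h
  simp only []
  rw [h]
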